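-- pv_equiv track=rewrite | github.com/Ne0tea/Rice-pan-genome-analysis | 00utility/26_find_centro_duploc.py | rm_dup
-- ===== SOURCE A (Python) =====
-- def rm_dup(lists):
--     """
--     去除列表中的重复元素，但是保留最长的重复元素列表。
--     参数:
--     lists -- 包含多个子列表的列表
--     返回值:
--     unique_lists -- 去除重复元素后的列表，其中如果存在重复元素，则保留最长的重复元素列表
--     """
--     unique_lists = []
--     for index1 in range(0,len(lists)):
--         homo_list=[]
--         homo_list.append(lists[index1])
--         for index2 in range(0,len(lists)):
--             if len(list(set(lists[index1]) & set(lists[index2]))) != 0: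
--                 homo_list.append(lists[index2])
--         if len(homo_list)==0:
--             unique_lists.append(lists[index1])
--         longest_list = max(homo_list, key=len)
--         if longest_list == lists[index1]:
--             unique_lists.append(longest_list)
--     return unique_lists
-- ===== SOURCE B (Python) =====
-- def rm_dup(lists):
--     # One pass builds, for every element, the length of the longest list containing it;
--     # a second pass keeps exactly the lists no element-sharing list is strictly longer than.
--     maxlen = {}
--     for lst in lists:
--         n = len(lst)
--         for e in set(lst):
--             if maxlen.get(e, 0) < n:
--                 maxlen[e] = n
--     return [lst for lst in lists if all(maxlen[e] <= len(lst) for e in lst)]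
-- ===== Notes on version B (the rewrite author's own statement) =====
-- stated objective: faster
-- what changed: Replaced the quadratic all-pairs set-intersection scan by a single pass building an element-to-longest-list-length dictionary, then one filter pass checking each list's elements against it.
import Mathlib
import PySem

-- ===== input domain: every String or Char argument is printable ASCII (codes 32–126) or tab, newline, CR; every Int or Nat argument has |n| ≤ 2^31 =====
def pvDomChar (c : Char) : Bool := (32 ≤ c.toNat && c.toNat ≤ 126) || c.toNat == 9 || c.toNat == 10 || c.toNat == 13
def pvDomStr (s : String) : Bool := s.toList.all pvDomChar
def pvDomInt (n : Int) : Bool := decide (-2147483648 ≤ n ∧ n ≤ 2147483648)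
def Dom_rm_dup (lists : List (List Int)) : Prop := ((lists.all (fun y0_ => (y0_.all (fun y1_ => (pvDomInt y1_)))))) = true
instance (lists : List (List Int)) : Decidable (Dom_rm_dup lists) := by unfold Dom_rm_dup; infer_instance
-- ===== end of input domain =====

-- B replaces A's all-pairs set-intersection scan by one pass building an
-- element -> longest-containing-list-length dictionary plus one filter pass.

-- ===== PORT A =====
-- inner loop body: 'if len(list(set(lists[index1]) & set(lists[index2]))) != 0: homo_list.append(lists[index2])'
def rm_dup_innerA (li1 : List Int) (homo : List (List Int)) (li2 : List Int) : List (List Int) :=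
  if PySem.Set.len (PySem.Set.inter (PySem.Set.ofList li1) (PySem.Set.ofList li2)) ≠ 0
  then homo ++ [li2] else homo

-- outer loop body for one index1 (max(..., key=len) is PySem.List.max?, Python's first extremal;
-- the 'none' branch is Python's ValueError on an empty max(), unreachable since homo_list is nonempty)
def rm_dup_bodyA (lists : List (List Int)) (unique_lists : List (List Int)) (li1 : List Int) :
    List (List Int) :=
  let homo_list : List (List Int) := [] ++ [li1]
  let homo_list := (PySem.List.pyRange 0 (PySem.List.len lists) 1).foldl
    (fun homo index2 => rm_dup_innerA li1 homo (PySem.List.pyGetD lists index2 [])) homo_list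
  let unique_lists := if PySem.List.len homo_list = 0 then unique_lists ++ [li1] else unique_lists
  match PySem.List.max? homo_list (fun l => PySem.List.len l) with
  | some longest => if longest = li1 then unique_lists ++ [longest] else unique_lists
  | none => unique_lists

def rm_dup (lists : List (List Int)) : List (List Int) :=
  (PySem.List.pyRange 0 (PySem.List.len lists) 1).foldl
    (fun unique_lists index1 => rm_dup_bodyA lists unique_lists (PySem.List.pyGetD lists index1 []))
    []

-- ===== PORT B =====
-- 'for e in set(lst): if maxlen.get(e, 0) < n: maxlen[e] = n'  (the dict is only looked up afterwards,
-- so B's result does not depend on the set's iteration order)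
def rm_dup_bodyB (d : PySem.Dict Int Int) (lst : List Int) : PySem.Dict Int Int :=
  let n : Int := PySem.List.len lst
  (PySem.Set.ofList lst).foldl
    (fun d e => if PySem.Dict.getD d e 0 < n then PySem.Dict.insert d e n else d) d

-- 'maxlen[e]' always finds its key (every e ∈ lst was inserted), so getD with default 0 is exact here
def rm_dup_alt (lists : List (List Int)) : List (List Int) :=
  let maxlen : PySem.Dict Int Int := lists.foldl rm_dup_bodyB PySem.Dict.empty
  lists.filter (fun lst =>
    lst.all (fun e => decide (PySem.Dict.getD maxlen e 0 ≤ PySem.List.len lst)))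

-- ===== PRECONDITION & SPEC =====
def Spec_rm_dup (lists : List (List Int)) (out : List (List Int)) : Prop := out = rm_dup_alt lists
instance (lists : List (List Int)) (out : List (List Int)) : Decidable (Spec_rm_dup lists out) := by unfold Spec_rm_dup; infer_instance

-- ===== CLAIM (what is proved, stated in full; the proofs are below) =====
def Claim_equal_rm_dup : Prop := ∀ (lists : List (List Int)), Dom_rm_dup lists → Spec_rm_dup lists (rm_dup lists)

-- ===== LEMMAS AND PROOFS =====

-- 'L and M share an element'
def pvShares (L M : List Int) : Bool := L.any (fun e => M.contains e)

-- the common characterisation: keep L iff no element-sharing list of 'lists' is strictly longer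
def pvKeep (lists : List (List Int)) (L : List Int) : Bool :=
  lists.all (fun M => !pvShares L M || decide (PySem.List.len M ≤ PySem.List.len L))

theorem inter_cond (a b : List Int) :
    (PySem.Set.len (PySem.Set.inter (PySem.Set.ofList a) (PySem.Set.ofList b)) ≠ 0) ↔
      pvShares a b = true := by
  have h : ∀ y, y ∈ PySem.Set.inter (PySem.Set.ofList a) (PySem.Set.ofList b) ↔ (y ∈ a ∧ y ∈ b) := by
    intro y
    rw [PySem.Set.mem_inter, PySem.Set.mem_ofList, PySem.Set.mem_ofList]
  simp [PySem.Set.len, pvShares]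
  rw [List.eq_nil_iff_forall_not_mem]
  push Not
  simp [h]

theorem max?_cons_of_all_le (t : List (List Int)) : ∀ x : List Int,
    (∀ y ∈ t, PySem.List.len y ≤ PySem.List.len x) →
    PySem.List.max? (x :: t) (fun l => PySem.List.len l) = some x := by
  induction t with
  | nil => intro x _; rfl
  | cons y t ih =>
    intro x h
    have hy : ¬ PySem.List.len x < PySem.List.len y := not_lt.2 (h y (by simp))
    have := ih x (fun z hz => h z (by simp [hz]))
    simp only [PySem.List.max?, List.foldl_cons] at this ⊢
    rw [if_neg hy]
    exact this

theorem stepA (lists u : List (List Int)) (li1 : List Int) :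
    rm_dup_bodyA lists u li1 = if pvKeep lists li1 then u ++ [li1] else u := by
  unfold rm_dup_bodyA
  dsimp only
  rw [PySem.List.foldl_pyRange_zero_pyGetD lists [] (rm_dup_innerA li1) ([] ++ [li1])]
  have hhomo : lists.foldl (rm_dup_innerA li1) ([] ++ [li1]) =
      li1 :: lists.filter (fun M => pvShares li1 M) := by
    unfold rm_dup_innerA
    rw [PySem.List.foldl_append_ite_eq_filter
      (fun li2 => PySem.Set.len (PySem.Set.inter (PySem.Set.ofList li1) (PySem.Set.ofList li2)) ≠ 0)]
    simp only [List.nil_append, List.singleton_append, List.cons.injEq, true_and]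
    apply List.filter_congr
    intro M _
    by_cases h : pvShares li1 M = true
    · rw [h]; exact decide_eq_true ((inter_cond li1 M).2 h)
    · rw [Bool.not_eq_true] at h
      rw [h]
      exact decide_eq_false (fun hc => by rw [(inter_cond li1 M).1 hc] at h; exact Bool.true_eq_false.mp h)
  rw [hhomo]
  have hlen : ¬ PySem.List.len (li1 :: lists.filter (fun M => pvShares li1 M)) = 0 := by
    simp [PySem.List.len]
    omega
  rw [if_neg hlen]
  by_cases hk : pvKeep lists li1 = true
  · have hall : ∀ y ∈ lists.filter (fun M => pvShares li1 M),
        PySem.List.len y ≤ PySem.List.len li1 := by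
      intro y hy
      rw [List.mem_filter] at hy
      have := (List.all_eq_true.1 hk) y hy.1
      simp [hy.2] at this
      simp [PySem.List.len]
      exact_mod_cast this
    rw [max?_cons_of_all_le _ li1 hall]
    simp [hk]
  · have hex : ∃ M ∈ lists, pvShares li1 M = true ∧ PySem.List.len li1 < PySem.List.len M := by
      by_contra hc
      push Not at hc
      apply hk
      unfold pvKeep
      rw [List.all_eq_true]
      intro M hM
      by_cases hs : pvShares li1 M = true
      · have h2 := hc M hM hs
        simp [PySem.List.len] at h2
        simp [hs, h2]
      · simp [eq_false_of_ne_true hs]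
    rcases hex with ⟨M, hMmem, hMsh, hMlt⟩
    cases hmax : PySem.List.max? (li1 :: lists.filter (fun M => pvShares li1 M))
        (fun l => PySem.List.len l) with
    | none => exact absurd ((PySem.List.max?_eq_none_iff _ _).1 hmax) (by simp)
    | some m =>
      have hMin : M ∈ li1 :: lists.filter (fun M => pvShares li1 M) := by
        simp [List.mem_filter, hMmem, hMsh]
      have hle := PySem.List.max?_isMax hmax M hMin
      have hne : m ≠ li1 := by
        intro he; rw [he] at hle
        exact absurd (lt_of_lt_of_le hMlt hle) (lt_irrefl _)
      dsimp only
      rw [if_neg hne, if_neg hk]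

theorem A_filter (lists : List (List Int)) :
    rm_dup lists = lists.filter (pvKeep lists) := by
  unfold rm_dup
  rw [PySem.List.foldl_pyRange_zero_pyGetD lists [] (rm_dup_bodyA lists) []]
  have hbody : lists.foldl (rm_dup_bodyA lists) [] =
      lists.foldl (fun u L => if pvKeep lists L then u ++ [L] else u) [] := by
    congr 1
    funext u L
    exact stepA lists u L
  rw [hbody, PySem.List.foldl_append_if_eq_filter]
  simp

theorem getD_updloop (n : Int) (s : List Int) : ∀ (d : PySem.Dict Int Int) (e : Int),
    PySem.Dict.getD (s.foldl
      (fun d x => if PySem.Dict.getD d x 0 < n then PySem.Dict.insert d x n else d) d) e 0 =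
      if e ∈ s then max (PySem.Dict.getD d e 0) n else PySem.Dict.getD d e 0 := by
  induction s with
  | nil => intro d e; simp
  | cons x s ih =>
    intro d e
    rw [List.foldl_cons, ih]
    have hup : PySem.Dict.getD
        (if PySem.Dict.getD d x 0 < n then PySem.Dict.insert d x n else d) e 0 =
        if e = x then max (PySem.Dict.getD d e 0) n else PySem.Dict.getD d e 0 := by
      by_cases h1 : PySem.Dict.getD d x 0 < n <;> by_cases h2 : e = x <;>
        simp [h1, h2, PySem.Dict.getD_insert] <;> omega
    rw [hup]
    by_cases h1 : e = x <;> by_cases h2 : e ∈ s <;>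
      simp [h1, h2]

theorem getD_bodyB (d : PySem.Dict Int Int) (lst : List Int) (e : Int) :
    PySem.Dict.getD (rm_dup_bodyB d lst) e 0 =
      if e ∈ lst then max (PySem.Dict.getD d e 0) (PySem.List.len lst)
      else PySem.Dict.getD d e 0 := by
  unfold rm_dup_bodyB
  dsimp only
  rw [getD_updloop]
  by_cases h : e ∈ lst <;> simp [h, PySem.Set.mem_ofList]

theorem getD_build_le_iff (ls : List (List Int)) : ∀ (d : PySem.Dict Int Int) (e c : Int),
    (PySem.Dict.getD (ls.foldl rm_dup_bodyB d) e 0 ≤ c) ↔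
      (PySem.Dict.getD d e 0 ≤ c ∧ ∀ M ∈ ls, e ∈ M → PySem.List.len M ≤ c) := by
  induction ls with
  | nil => intro d e c; simp
  | cons lst ls ih =>
    intro d e c
    rw [List.foldl_cons, ih, getD_bodyB]
    by_cases h : e ∈ lst
    · rw [if_pos h]
      simp only [max_le_iff, List.forall_mem_cons]
      tauto
    · rw [if_neg h]
      simp only [List.forall_mem_cons]
      tauto

theorem B_filter (lists : List (List Int)) :
    rm_dup_alt lists = lists.filter (pvKeep lists) := by
  unfold rm_dup_alt
  dsimp only
  apply List.filter_congr
  intro lst _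
  have key : (lst.all (fun e => decide
      (PySem.Dict.getD (lists.foldl rm_dup_bodyB PySem.Dict.empty) e 0 ≤ PySem.List.len lst)) = true)
      ↔ (pvKeep lists lst = true) := by
    rw [List.all_eq_true]
    unfold pvKeep
    rw [List.all_eq_true]
    constructor
    · intro h M hM
      by_cases hs : pvShares lst M = true
      · rcases (by simpa [pvShares] using hs : ∃ e ∈ lst, e ∈ M) with ⟨e, he, heM⟩
        have := h e he
        rw [decide_eq_true_eq, getD_build_le_iff] at this
        have h4 := this.2 M hM heM
        simp [PySem.List.len] at h4
        simp [hs, h4]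
      · simp [eq_false_of_ne_true hs]
    · intro h e he
      rw [decide_eq_true_eq, getD_build_le_iff]
      refine ⟨by simp [PySem.Dict.getD_empty, PySem.List.len], ?_⟩
      intro M hM heM
      have := h M hM
      have hs : pvShares lst M = true := by simp [pvShares]; exact ⟨e, he, heM⟩
      simp [hs] at this
      simp [PySem.List.len]
      exact_mod_cast this
  exact Bool.coe_iff_coe.1 key

-- ===== VERDICT (by name: the statement is the Claim_ definition above) =====
theorem rm_dup_spec : Claim_equal_rm_dup := by
  intro lists _
  unfold Spec_rm_dup
  rw [A_filter, B_filter]
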